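-- pv_equiv track=rewrite | github.com/ddekshina/trial1 | backend/utils/quote_calculator.py | calculate_integration_cost
-- ===== SOURCE A (Python) =====
-- def calculate_db_table_cost(record_count):
--     if record_count < 1000:
--         return 40
--     elif 1000 <= record_count < 10000:
--         return 100
--     elif 10000 <= record_count < 100000:
--         return 200
--     elif 100000 <= record_count < 1000000:
--         return 300
--     elif 1000000 <= record_count < 10000000:
--         return 300
--     else:  # > 10,000,000
--         return 700
--
-- def calculate_integration_cost(integrations):
--     cost = 0
--     for integration in integrations:
--         # Base API cost
--         cost += 400
--
--         # DB integration cost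
--         cost += 400
--
--         # Backend deployment
--         cost += 400
--
--         # Add DB hosting cost if applicable
--         if integration.get('db_tables'):
--             for table in integration['db_tables']:
--                 cost += calculate_db_table_cost(table.get('record_count', 0))
--     return cost
-- ===== SOURCE B (Python) =====
-- # Tier pricing by threshold-crossing counts: each table starts at 40 and each
-- # threshold it reaches adds the price increment for that tier, so the hosting
-- # total is 40*#tables + sum(increment * count(rc >= threshold)).
-- _STEPS = ((1000, 60), (10000, 100), (100000, 100), (1000000, 0), (10000000, 400))
--
-- def calculate_integration_cost(integrations):
--     counts = [t.get('record_count', 0)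
--               for i in integrations for t in (i.get('db_tables') or [])]
--     total = 1200 * len(integrations) + 40 * len(counts)
--     for threshold, step in _STEPS:
--         total += step * sum(1 for rc in counts if rc >= threshold)
--     return total
-- ===== Notes on version B (the rewrite author's own statement) =====
-- stated objective: alternative
-- what changed: Replaces the nested accumulation loop with its per-table if/elif tier function by staged passes: flatten all record counts once, then price them in aggregate as 40 per table plus a price increment times the count of tables reaching each threshold (the per-table branch chain disappears).
import Mathlib
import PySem

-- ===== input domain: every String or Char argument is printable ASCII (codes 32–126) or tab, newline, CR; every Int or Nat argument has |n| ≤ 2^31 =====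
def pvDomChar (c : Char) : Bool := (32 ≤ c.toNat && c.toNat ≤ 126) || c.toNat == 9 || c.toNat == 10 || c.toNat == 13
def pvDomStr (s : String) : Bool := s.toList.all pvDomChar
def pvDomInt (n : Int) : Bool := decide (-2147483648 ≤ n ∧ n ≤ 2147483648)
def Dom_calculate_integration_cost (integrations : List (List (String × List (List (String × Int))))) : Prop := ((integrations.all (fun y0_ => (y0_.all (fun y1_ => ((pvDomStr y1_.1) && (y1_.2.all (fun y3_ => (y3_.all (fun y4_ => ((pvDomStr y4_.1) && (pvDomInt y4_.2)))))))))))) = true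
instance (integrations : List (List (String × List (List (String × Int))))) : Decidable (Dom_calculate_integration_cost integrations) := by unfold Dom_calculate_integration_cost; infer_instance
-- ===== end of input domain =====

-- B removes the per-table if/elif tier function: it flattens all record counts once, then prices them in aggregate by counting threshold crossings (alternative decomposition, same cost).


-- ===== PORT A =====
-- same-module helper used by A
def calculate_db_table_cost (record_count : Int) : Int :=
  if record_count < 1000 then 40
  else if 1000 ≤ record_count ∧ record_count < 10000 then 100
  else if 10000 ≤ record_count ∧ record_count < 100000 then 200
  else if 100000 ≤ record_count ∧ record_count < 1000000 then 300
  else if 1000000 ≤ record_count ∧ record_count < 10000000 then 300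
  else 700

-- inner loop body of A: cost += calculate_db_table_cost(table.get('record_count', 0))
def pvInnerStep (c : Int) (table : List (String × Int)) : Int :=
  c + calculate_db_table_cost ((PySem.Dict.mk table).getD "record_count" 0)

-- outer loop body of A: the three += 400 then the guarded inner loop
def pvOuterStep (cost : Int) (integration : List (String × List (List (String × Int)))) : Int :=
  let cost := cost + 400      -- Base API cost
  let cost := cost + 400      -- DB integration cost
  let cost := cost + 400      -- Backend deployment
  -- if integration.get('db_tables'):  (truthiness: present and nonempty)
  match (PySem.Dict.mk integration).get? "db_tables" with
  | some tbls => if tbls.isEmpty then cost else tbls.foldl pvInnerStep cost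
  | none => cost

def calculate_integration_cost (integrations : List (List (String × List (List (String × Int))))) : Int :=
  integrations.foldl pvOuterStep 0

-- ===== PORT B =====
-- _STEPS = ((1000, 60), (10000, 100), (100000, 100), (1000000, 0), (10000000, 400))
def pvSteps : List (Int × Int) := [(1000, 60), (10000, 100), (100000, 100), (1000000, 0), (10000000, 400)]

def calculate_integration_cost_alt (integrations : List (List (String × List (List (String × Int))))) : Int :=
  -- counts = [t.get('record_count', 0) for i in integrations for t in (i.get('db_tables') or [])]
  let counts := integrations.flatMap (fun i =>
    (((PySem.Dict.mk i).get? "db_tables").getD []).map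
      (fun t => (PySem.Dict.mk t).getD "record_count" 0))
  -- total = 1200 * len(integrations) + 40 * len(counts)
  let total := 1200 * (integrations.length : Int) + 40 * (counts.length : Int)
  -- for threshold, step in _STEPS: total += step * sum(1 for rc in counts if rc >= threshold)
  pvSteps.foldl (fun total p => total + p.2 * ((counts.countP (fun rc => p.1 ≤ rc) : Nat) : Int)) total

-- ===== PRECONDITION & SPEC =====
def Spec_calculate_integration_cost (integrations : List (List (String × List (List (String × Int))))) (out : Int) : Prop := out = calculate_integration_cost_alt integrations
instance (integrations : List (List (String × List (List (String × Int))))) (out : Int) : Decidable (Spec_calculate_integration_cost integrations out) := by unfold Spec_calculate_integration_cost; infer_instance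

-- ===== CLAIM (what is proved, stated in full; the proofs are below) =====
def Claim_equal_calculate_integration_cost : Prop := ∀ (integrations : List (List (String × List (List (String × Int))))), Dom_calculate_integration_cost integrations → Spec_calculate_integration_cost integrations (calculate_integration_cost integrations)

-- ===== LEMMAS AND PROOFS =====

theorem inner_foldl_eq (tbls : List (List (String × Int))) (c : Int) :
    tbls.foldl pvInnerStep c
      = c + (tbls.map (fun t => calculate_db_table_cost ((PySem.Dict.mk t).getD "record_count" 0))).sum := by
  induction tbls generalizing c with
  | nil => simp
  | cons t ts ih => simp [pvInnerStep, ih]; ring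

theorem outer_step_eq (c : Int) (i : List (String × List (List (String × Int)))) :
    pvOuterStep c i
      = c + 1200 + ((((PySem.Dict.mk i).get? "db_tables").getD []).map
          (fun t => calculate_db_table_cost ((PySem.Dict.mk t).getD "record_count" 0))).sum := by
  unfold pvOuterStep
  cases h : (PySem.Dict.mk i).get? "db_tables" with
  | none => simp; ring
  | some tbls =>
      cases tbls with
      | nil => simp; ring
      | cons t ts => simp [inner_foldl_eq, pvInnerStep]; ring

-- A's fold computes 1200 per integration plus the per-table tier costs of all flattened counts
theorem calc_cost_eq (integrations : List (List (String × List (List (String × Int))))) (c : Int) :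
    integrations.foldl pvOuterStep c
      = c + 1200 * integrations.length
          + ((integrations.flatMap (fun i =>
                (((PySem.Dict.mk i).get? "db_tables").getD []).map
                  (fun t => (PySem.Dict.mk t).getD "record_count" 0))).map
              calculate_db_table_cost).sum := by
  induction integrations generalizing c with
  | nil => simp
  | cons i rest ih =>
      rw [List.foldl_cons, ih, outer_step_eq]
      simp [List.map_map, Function.comp_def]
      ring

-- each table's tier cost is 40 plus the increments of the thresholds it reaches
theorem per_elem_eq (c : Int) :
    calculate_db_table_cost c
      = 40 + 60 * (if (1000:Int) ≤ c then (1:Int) else 0)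
           + 100 * (if (10000:Int) ≤ c then (1:Int) else 0)
           + 100 * (if (100000:Int) ≤ c then (1:Int) else 0)
           + 400 * (if (10000000:Int) ≤ c then (1:Int) else 0) := by
  simp only [calculate_db_table_cost]
  split_ifs <;> omega

-- B's threshold-crossing aggregation prices any list of counts exactly as the per-table tier sum
theorem steps_fold_eq (counts : List Int) (t : Int) :
    pvSteps.foldl (fun total p => total + p.2 * ((counts.countP (fun rc => p.1 ≤ rc) : Nat) : Int))
        (t + 40 * (counts.length : Int))
      = t + (counts.map calculate_db_table_cost).sum := by
  induction counts generalizing t with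
  | nil => simp [pvSteps]
  | cons c cs ih =>
      have h := ih (t + calculate_db_table_cost c)
      simp only [pvSteps, List.foldl_cons, List.foldl_nil, List.countP_cons, List.map_cons,
        List.sum_cons, List.length_cons, decide_eq_true_eq] at h ⊢
      rw [per_elem_eq c] at h ⊢
      push_cast at h ⊢
      split_ifs at h ⊢ <;> omega

-- ===== VERDICT (by name: the statement is the Claim_ definition above) =====
theorem calculate_integration_cost_spec : Claim_equal_calculate_integration_cost := by
  intro integrations _
  show _ = _
  rw [calculate_integration_cost, calc_cost_eq, calculate_integration_cost_alt]
  rw [steps_fold_eq]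
  ring
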